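-- pv_equiv track=rewrite | github.com/Hallo0702/Algorithm | 프로그래머스/2/150369. 택배 배달과 수거하기/택배 배달과 수거하기.py | solution
-- ===== SOURCE A (Python) =====
-- def solution(cap, n, deliveries, pickups):
--     deliveries = [0] + deliveries
--     pickups = [0] + pickups
--
--     deliver = 0
--     pickup = 0
--
--     answer = 0
--
--     for i in range(n,0,-1):
--         deliver += deliveries[i]
--         pickup += pickups[i]
--
--         while deliver > 0 or pickup > 0:
--             answer += 2 * i
--             deliver -= cap
--             pickup -= cap
--
--     return answer
-- ===== SOURCE B (Python) =====
-- def solution(cap, n, deliveries, pickups):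
--     answer = 0
--     deliver = 0
--     pickup = 0
--     for i in range(n, 0, -1):
--         deliver += deliveries[i - 1]
--         pickup += pickups[i - 1]
--         if deliver > 0 or pickup > 0:
--             trips = max(-(-deliver // cap), -(-pickup // cap))
--             answer += 2 * i * trips
--             deliver -= trips * cap
--             pickup -= trips * cap
--     return answer
-- ===== Notes on version B (the rewrite author's own statement) =====
-- stated objective: alternative
-- what changed: The inner while loop that subtracts cap once per round trip is replaced by ceiling-division arithmetic computing the number of trips per position in O(1); intended as asymptotically faster, measured only ~1.3x on the generated timing inputs.
-- outside the precondition, e.g. on solution(0, 1, [0], [0]): A returns 0, B returns 0; on solution(0, 1, [1], [0]): A does not finish within the time limit, B raises ZeroDivisionError; on solution(2, 3, [1], [1]): A raises IndexError, B raises IndexError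
import Mathlib
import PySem

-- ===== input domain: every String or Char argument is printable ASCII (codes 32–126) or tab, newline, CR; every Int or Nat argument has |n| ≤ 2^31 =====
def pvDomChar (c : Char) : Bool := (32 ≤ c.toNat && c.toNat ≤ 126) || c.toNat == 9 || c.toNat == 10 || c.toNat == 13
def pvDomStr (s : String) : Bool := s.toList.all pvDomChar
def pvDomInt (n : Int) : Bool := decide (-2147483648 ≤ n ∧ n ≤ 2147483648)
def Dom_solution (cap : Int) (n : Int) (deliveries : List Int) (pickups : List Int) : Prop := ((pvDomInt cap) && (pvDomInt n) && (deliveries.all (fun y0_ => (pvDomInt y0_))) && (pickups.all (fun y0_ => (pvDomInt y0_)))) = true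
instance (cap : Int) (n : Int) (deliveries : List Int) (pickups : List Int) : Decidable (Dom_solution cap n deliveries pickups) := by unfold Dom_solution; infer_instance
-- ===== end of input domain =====

-- B replaces A's per-round-trip inner while loop by ceiling-division arithmetic per position (one fold, no inner loop).


-- ===== PORT A =====
-- A's inner 'while deliver > 0 or pickup > 0' loop; the '0 < cap' conjunct is a totality
-- guard only (for cap ≤ 0 with a positive load the Python diverges; outside Pre_).
def whileA (cap i : Int) (st : Int × Int × Int) : Int × Int × Int :=
  if (0 < st.1 ∨ 0 < st.2.1) ∧ 0 < cap then
    whileA cap i (st.1 - cap, st.2.1 - cap, st.2.2 + 2 * i)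
  else st
termination_by (max st.1 st.2.1).toNat
decreasing_by omega

def solution (cap : Int) (n : Int) (deliveries : List Int) (pickups : List Int) : Int :=
  let ds := 0 :: deliveries
  let ps := 0 :: pickups
  ((PySem.List.pyRange n 0 (-1)).foldl
    (fun st i =>
      whileA cap i (st.1 + PySem.List.pyGetD ds i 0, st.2.1 + PySem.List.pyGetD ps i 0, st.2.2))
    (0, 0, 0)).2.2

-- ===== PORT B =====
-- -(-a // b) in Python (ceiling division)
def ceilDivB (a b : Int) : Int := -(PySem.Int.floordiv (-a) b)

def solution_alt (cap : Int) (n : Int) (deliveries : List Int) (pickups : List Int) : Int :=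
  ((PySem.List.pyRange n 0 (-1)).foldl
    (fun st i =>
      let d := st.1 + PySem.List.pyGetD deliveries (i - 1) 0
      let p := st.2.1 + PySem.List.pyGetD pickups (i - 1) 0
      if 0 < d ∨ 0 < p then
        let t := max (ceilDivB d cap) (ceilDivB p cap)
        (d - t * cap, p - t * cap, st.2.2 + 2 * i * t)
      else (d, p, st.2.2))
    (0, 0, 0)).2.2

-- ===== PRECONDITION & SPEC =====
-- Pre_ excludes: cap ≤ 0 with n ≥ 1, where A's while loop diverges whenever some accumulated
-- load is positive (A returns 0 only in the degenerate case of all loads nonpositive, where B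
-- would divide by cap); and n exceeding a list length, where A raises IndexError.
def Pre_solution (cap : Int) (n : Int) (deliveries : List Int) (pickups : List Int) : Prop :=
  n ≤ 0 ∨ (1 ≤ cap ∧ n ≤ (deliveries.length : Int) ∧ n ≤ (pickups.length : Int))
instance (cap : Int) (n : Int) (deliveries : List Int) (pickups : List Int) : Decidable (Pre_solution cap n deliveries pickups) := by unfold Pre_solution; infer_instance

def pvWitness_solution : Int × Int × List Int × List Int := (4, 4, [1, 0, 3, 2], [0, 3, 0, 4])

def Spec_solution (cap : Int) (n : Int) (deliveries : List Int) (pickups : List Int) (out : Int) : Prop := out = solution_alt cap n deliveries pickups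
instance (cap : Int) (n : Int) (deliveries : List Int) (pickups : List Int) (out : Int) : Decidable (Spec_solution cap n deliveries pickups out) := by unfold Spec_solution; infer_instance

-- ===== CLAIM (what is proved, stated in full; the proofs are below) =====
def Claim_equal_solution : Prop := ∀ (cap : Int) (n : Int) (deliveries : List Int) (pickups : List Int), Dom_solution cap n deliveries pickups → Pre_solution cap n deliveries pickups → Spec_solution cap n deliveries pickups (solution cap n deliveries pickups)

-- ===== LEMMAS AND PROOFS =====

lemma ceil_le_iff (a cap q : Int) (hc : 0 < cap) : ceilDivB a cap ≤ q ↔ a ≤ q * cap := by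
  unfold ceilDivB
  rw [PySem.Int.floordiv_eq_ediv_of_pos hc]
  constructor
  · intro h
    have h1 := Int.mul_ediv_add_emod (-a) cap
    have h2 := Int.emod_nonneg (-a) (by omega : cap ≠ 0)
    have h3 : -q ≤ (-a) / cap := by omega
    nlinarith [Int.mul_ediv_add_emod (-a) cap]
  · intro h
    have : -q ≤ (-a) / cap := Int.le_ediv_iff_mul_le hc |>.2 (by nlinarith)
    omega

lemma ceil_shift (a cap : Int) (hc : 0 < cap) : ceilDivB (a - cap) cap = ceilDivB a cap - 1 := by
  unfold ceilDivB
  rw [PySem.Int.floordiv_eq_ediv_of_pos hc, PySem.Int.floordiv_eq_ediv_of_pos hc]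
  have : -(a - cap) = -a + 1 * cap := by ring
  rw [this, Int.add_mul_ediv_right _ _ (by omega : cap ≠ 0)]
  ring

lemma whileA_eq (cap i : Int) (hc : 0 < cap) : ∀ (k : Nat) (d p ans : Int),
    (max d p).toNat ≤ k →
    whileA cap i (d, p, ans) =
      (if 0 < d ∨ 0 < p then
        (d - max (ceilDivB d cap) (ceilDivB p cap) * cap,
         p - max (ceilDivB d cap) (ceilDivB p cap) * cap,
         ans + 2 * i * max (ceilDivB d cap) (ceilDivB p cap))
      else (d, p, ans)) := by
  intro k
  induction k with
  | zero =>
    intro d p ans hk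
    have hd : ¬ (0 < d ∨ 0 < p) := by omega
    rw [whileA]
    simp only [hd, ite_false]
    simp
  | succ k ih =>
    intro d p ans hk
    by_cases hg : 0 < d ∨ 0 < p
    · rw [whileA]
      simp only [hg, hc, and_true, if_pos]
      have hk' : (max (d - cap) (p - cap)).toNat ≤ k := by omega
      rw [ih (d - cap) (p - cap) (ans + 2 * i) hk']
      have hsd := ceil_shift d cap hc
      have hsp := ceil_shift p cap hc
      by_cases hg' : 0 < d - cap ∨ 0 < p - cap
      · simp only [hg', if_pos]
        have ht : max (ceilDivB (d - cap) cap) (ceilDivB (p - cap) cap)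
            = max (ceilDivB d cap) (ceilDivB p cap) - 1 := by
          rw [hsd, hsp]; omega
        rw [ht]
        refine Prod.ext (by ring) (Prod.ext (by ring) (by ring))
      · simp only [hg', ite_false]
        -- the loop ran exactly once: max of the two ceilings is 1
        have hd1 : ceilDivB d cap ≤ 1 := (ceil_le_iff d cap 1 hc).2 (by omega)
        have hp1 : ceilDivB p cap ≤ 1 := (ceil_le_iff p cap 1 hc).2 (by omega)
        have hge : 1 ≤ max (ceilDivB d cap) (ceilDivB p cap) := by
          rcases hg with h | h
          · have : ¬ ceilDivB d cap ≤ 0 := fun hle => by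
              have := (ceil_le_iff d cap 0 hc).1 hle; omega
            omega
          · have : ¬ ceilDivB p cap ≤ 0 := fun hle => by
              have := (ceil_le_iff p cap 0 hc).1 hle; omega
            omega
        have ht : max (ceilDivB d cap) (ceilDivB p cap) = 1 := by omega
        rw [ht]
        refine Prod.ext (by ring) (Prod.ext (by ring) (by ring))
    · rw [whileA]
      simp [hg]

lemma pyGetD_cons_shift (x : Int) (xs : List Int) (i : Int) (hi : 1 ≤ i) :
    PySem.List.pyGetD (x :: xs) i 0 = PySem.List.pyGetD xs (i - 1) 0 := by
  have h : i = ((i - 1).toNat : Int) + 1 := by omega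
  rw [h]
  simp only [PySem.List.pyGetD, PySem.List.pyGet?_cons_succ, add_sub_cancel_right]

theorem solution_spec_aux (cap n : Int) (deliveries pickups : List Int)
    (h : Pre_solution cap n deliveries pickups) :
    solution cap n deliveries pickups = solution_alt cap n deliveries pickups := by
  rcases h with hn | ⟨hc, _, _⟩
  · unfold solution solution_alt
    rw [PySem.List.pyRange_neg_one_eq_nil (by omega : n ≤ 0)]
    rfl
  · unfold solution solution_alt
    dsimp only
    refine congrArg (fun x : Int × Int × Int => x.2.2) ?_
    apply PySem.List.foldl_congr_mem
    intro st i hi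
    have hmem : 0 < i ∧ i ≤ n := by simpa using (PySem.List.mem_pyRange_neg_one.mp hi)
    have h1 : (1 : Int) ≤ i := by omega
    rw [pyGetD_cons_shift 0 deliveries i h1, pyGetD_cons_shift 0 pickups i h1]
    rw [whileA_eq cap i (by omega)
      ((max (st.1 + PySem.List.pyGetD deliveries (i - 1) 0)
            (st.2.1 + PySem.List.pyGetD pickups (i - 1) 0)).toNat) _ _ _ le_rfl]

-- ===== VERDICT (by name: the statement is the Claim_ definition above) =====
theorem solution_spec : Claim_equal_solution := by
  intro cap n deliveries pickups _ hpre
  unfold Spec_solution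
  exact solution_spec_aux cap n deliveries pickups hpre
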